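-- pv_equiv track=rewrite | github.com/Mel-Ja/IP | practica8.py | tokenizar_linea_csv
-- ===== SOURCE A (Python) =====
-- def tokenizar_linea_csv(linea: str) -> list[str]:
--     tokens: list[str] = []
--     token_actual: str = ""
--
--     delimitadores: list[str] = [",", "\n"]
--
--     for caracter in linea:
--         if caracter not in delimitadores:
--             token_actual += caracter
--         else:
--             tokens.append(token_actual)
--             token_actual = ""
--     if token_actual != "":
--         tokens.append(token_actual)
--
--     return tokens
-- ===== SOURCE B (Python) =====
-- def tokenizar_linea_csv(linea: str) -> list[str]:
--     # Emit whole segments: scan to the next delimiter, slice it off, repeat.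
--     tokens: list[str] = []
--     resto: str = linea
--     while resto:
--         i = 0
--         while i < len(resto) and resto[i] != ',' and resto[i] != '\n':
--             i += 1
--         if i == len(resto):
--             tokens.append(resto)
--             break
--         tokens.append(resto[:i])
--         resto = resto[i + 1:]
--     return tokens
-- ===== Notes on version B (the rewrite author's own statement) =====
-- stated objective: alternative
-- what changed: B replaces A's char-by-char accumulator (build token_actual one character at a time, flush on delimiter, final conditional flush) with a segment-at-a-time decomposition: scan to the next delimiter, slice the whole segment off and emit it; the trailing-empty rule falls out of the loop structure instead of a final flush test.
import Mathlib
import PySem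

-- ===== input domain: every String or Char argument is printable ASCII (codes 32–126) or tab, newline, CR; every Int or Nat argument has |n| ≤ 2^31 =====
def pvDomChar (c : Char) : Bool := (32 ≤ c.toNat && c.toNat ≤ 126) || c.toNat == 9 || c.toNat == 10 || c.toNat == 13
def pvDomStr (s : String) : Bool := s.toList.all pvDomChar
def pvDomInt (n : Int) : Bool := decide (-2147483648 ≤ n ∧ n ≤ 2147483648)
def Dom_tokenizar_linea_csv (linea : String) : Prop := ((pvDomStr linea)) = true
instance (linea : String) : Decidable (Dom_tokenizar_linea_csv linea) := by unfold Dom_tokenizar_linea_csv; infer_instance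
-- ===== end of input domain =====

-- B emits whole delimiter-separated segments (scan-and-slice) instead of A's char-by-char accumulator; same cost, different decomposition.


-- ===== PORT A =====
-- delimitadores = [",", "\n"]
def pvDelimitadores : List Char := [',', '\n']

-- one iteration of A's for-loop over (tokens, token_actual)
def pvTokAStep (st : List (List Char) × List Char) (c : Char) : List (List Char) × List Char :=
  if pvDelimitadores.contains c = false then (st.1, st.2 ++ [c])
  else (st.1 ++ [st.2], [])

def tokenizar_linea_csv (linea : String) : List String :=
  let r := linea.toList.foldl pvTokAStep ([], [])
  (if r.2 ≠ [] then r.1 ++ [r.2] else r.1).map (fun t => String.ofList t)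

-- ===== PORT B =====
-- resto[i] != ',' and resto[i] != '\n'
def pvNondelim (c : Char) : Bool := c != ',' && c != '\n'

-- B's outer while-loop: scan to the first delimiter (takeWhile/dropWhile = the inner
-- index scan and the two slices resto[:i], resto[i+1:]), emit the segment, continue.
def pvTokBGo (resto : List Char) : List (List Char) :=
  if resto = [] then []
  else if resto.dropWhile pvNondelim = [] then [resto.takeWhile pvNondelim]
  else resto.takeWhile pvNondelim :: pvTokBGo (resto.dropWhile pvNondelim).tail
termination_by resto.length
decreasing_by
  have hle : (resto.dropWhile pvNondelim).length ≤ resto.length :=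
    (List.dropWhile_sublist _).length_le
  rename_i _ h2
  have hpos := List.length_pos_of_ne_nil h2
  simp only [List.length_tail]
  omega

def tokenizar_linea_csv_alt (linea : String) : List String :=
  (pvTokBGo linea.toList).map (fun t => String.ofList t)

-- ===== PRECONDITION & SPEC =====
def Spec_tokenizar_linea_csv (linea : String) (out : List String) : Prop := out = tokenizar_linea_csv_alt linea
instance (linea : String) (out : List String) : Decidable (Spec_tokenizar_linea_csv linea out) := by unfold Spec_tokenizar_linea_csv; infer_instance

-- ===== CLAIM (what is proved, stated in full; the proofs are below) =====
def Claim_equal_tokenizar_linea_csv : Prop := ∀ (linea : String), Dom_tokenizar_linea_csv linea → Spec_tokenizar_linea_csv linea (tokenizar_linea_csv linea)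

-- ===== LEMMAS AND PROOFS =====

-- glue cur l : attach a pending prefix cur to the first segment of l
-- (if there is no segment, cur becomes a final token unless it is empty)
def pvGlue (cur : List Char) : List (List Char) → List (List Char)
  | [] => if cur = [] then [] else [cur]
  | p :: ps => (cur ++ p) :: ps

theorem pvGlue_nil_left (l : List (List Char)) : pvGlue [] l = l := by
  cases l <;> simp [pvGlue]

theorem pvGlue_glue (cur : List Char) (c : Char) (l : List (List Char)) :
    pvGlue cur (pvGlue [c] l) = pvGlue (cur ++ [c]) l := by
  cases l <;> simp [pvGlue]

theorem pvTokBGo_nil : pvTokBGo [] = [] := by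
  simp [pvTokBGo]

theorem pvTokBGo_delim (c : Char) (hc : pvNondelim c = false) (tl : List Char) :
    pvTokBGo (c :: tl) = [] :: pvTokBGo tl := by
  rw [pvTokBGo]
  simp [hc]

theorem pvTokBGo_nondelim (c : Char) (hc : pvNondelim c = true) (tl : List Char) :
    pvTokBGo (c :: tl) = pvGlue [c] (pvTokBGo tl) := by
  rw [pvTokBGo]
  simp only [List.dropWhile_cons, List.takeWhile_cons, hc, if_true, reduceCtorEq, if_false]
  cases tl with
  | nil => simp [pvTokBGo_nil, pvGlue]
  | cons x xs =>
    by_cases h : List.dropWhile pvNondelim (x :: xs) = []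
    · rw [if_pos h]
      conv_rhs => rw [pvTokBGo]
      rw [if_neg (by simp), if_pos h]
      simp [pvGlue]
    · rw [if_neg h]
      conv_rhs => rw [pvTokBGo]
      rw [if_neg (by simp), if_neg h]
      simp [pvGlue]

theorem pvKey (cs : List Char) : ∀ (tokens : List (List Char)) (cur : List Char),
    (if (cs.foldl pvTokAStep (tokens, cur)).2 ≠ [] then
        (cs.foldl pvTokAStep (tokens, cur)).1 ++ [(cs.foldl pvTokAStep (tokens, cur)).2]
      else (cs.foldl pvTokAStep (tokens, cur)).1)
    = tokens ++ pvGlue cur (pvTokBGo cs) := by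
  induction cs with
  | nil =>
    intro tokens cur
    by_cases h : cur = [] <;> simp [pvTokBGo_nil, pvGlue, h]
  | cons c tl ih =>
    intro tokens cur
    simp only [List.foldl_cons]
    by_cases hc : pvNondelim c = true
    · rw [pvTokBGo_nondelim c hc tl, pvGlue_glue]
      have hstep : pvTokAStep (tokens, cur) c = (tokens, cur ++ [c]) := by
        have h1 : c ≠ ',' ∧ c ≠ '\n' := by simpa [pvNondelim] using hc
        simp [pvTokAStep, pvDelimitadores, h1.1, h1.2]
      rw [hstep]
      exact ih tokens (cur ++ [c])
    · have hc' : pvNondelim c = false := by simpa using hc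
      rw [pvTokBGo_delim c hc' tl]
      have hstep : pvTokAStep (tokens, cur) c = (tokens ++ [cur], []) := by
        have h1 : c = ',' ∨ c = '\n' := by
          have h3 : ¬c = ',' → c = '\n' := by simpa [pvNondelim] using hc'
          tauto
        rcases h1 with h1 | h1 <;> simp [pvTokAStep, pvDelimitadores, h1]
      rw [hstep, ih (tokens ++ [cur]) [], pvGlue_nil_left]
      simp [pvGlue]

-- ===== VERDICT (by name: the statement is the Claim_ definition above) =====
theorem tokenizar_linea_csv_spec : Claim_equal_tokenizar_linea_csv := by
  intro linea _
  show _ = _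
  simp only [tokenizar_linea_csv, tokenizar_linea_csv_alt]
  rw [pvKey linea.toList [] [], pvGlue_nil_left]
  simp
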